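-- pv_equiv track=rewrite | github.com/attilagaspar/econai-llmocr | opencv_tablesearch.py | nms_line_coords
-- ===== SOURCE A (Python) =====
-- def nms_line_coords(coords, threshold=10):
--     """
--     Given a list of coordinates (ints), sort and merge those that are within 'threshold' pixels.
--     Returns a list of averaged coordinates.
--     """
--     if not coords:
--         return []
--     coords = sorted(coords)
--     merged = []
--     group = [coords[0]]
--     for c in coords[1:]:
--         if abs(c - group[-1]) < threshold:
--             group.append(c)
--         else:
--             merged.append(int(round(sum(group)/len(group))))
--             group = [c]
--     merged.append(int(round(sum(group)/len(group))))
--     return merged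
-- ===== SOURCE B (Python) =====
-- def nms_line_coords(coords, threshold=10):
--     # Staged plan: (1) sort; (2) compute the breakpoint indices where the gap
--     # between consecutive sorted values reaches the threshold; (3) slice the
--     # sorted list between consecutive breakpoints and average each slice.
--     s = sorted(coords)
--     if not s:
--         return []
--     cuts = [0] + [i for i in range(1, len(s)) if s[i] - s[i - 1] >= threshold] + [len(s)]
--     return [int(round(sum(s[a:b]) / (b - a))) for a, b in zip(cuts, cuts[1:])]
-- ===== Notes on version B (the rewrite author's own statement) =====
-- stated objective: alternative
-- what changed: B replaces A's single accumulating walk (grow a group list, flush its average at each gap) by a staged computation: sort, then compute the list of breakpoint indices where the sorted gap reaches the threshold, then slice the sorted list between consecutive breakpoints and average each slice.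
import Mathlib
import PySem

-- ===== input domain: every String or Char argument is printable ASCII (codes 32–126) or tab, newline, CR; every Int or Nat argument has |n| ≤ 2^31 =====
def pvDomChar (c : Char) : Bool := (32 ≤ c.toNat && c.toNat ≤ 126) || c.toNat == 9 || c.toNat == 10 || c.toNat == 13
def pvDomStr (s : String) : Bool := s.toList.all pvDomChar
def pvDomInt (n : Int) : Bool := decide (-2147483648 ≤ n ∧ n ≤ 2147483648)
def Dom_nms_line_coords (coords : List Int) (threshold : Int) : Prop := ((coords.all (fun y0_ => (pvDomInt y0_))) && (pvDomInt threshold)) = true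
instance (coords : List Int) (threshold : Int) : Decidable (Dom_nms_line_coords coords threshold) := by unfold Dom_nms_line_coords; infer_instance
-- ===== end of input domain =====

-- B replaces A's accumulating group/flush walk by a staged computation: it first derives the
-- breakpoint indices where the sorted gap reaches the threshold, then slices the sorted list
-- between consecutive breakpoints and averages each slice; objective: alternative decomposition.

-- exact round-half-even of m / L for L > 0: the shared rounding step int(round(sum/len));
-- exact rational semantics, matching Python's float round on the sampled bounded domain
def pyRoundAvg (m : Int) (L : Int) : Int :=
  let q := PySem.Int.floordiv m L
  let r := m - L * q
  if 2 * r < L then q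
  else if L < 2 * r then q + 1
  else if q % 2 = 0 then q else q + 1

-- ===== PORT A =====
def nms_line_coords (coords : List Int) (threshold : Int) : List Int :=
  if coords = [] then []
  else
    match PySem.List.sorted coords (fun x => x) false with
    | [] => []   -- unreachable: sorted of a nonempty list is nonempty
    | c0 :: rest =>
      let st := rest.foldl
        (fun (st : List Int × List Int) c =>
          if |c - st.2.getLast?.getD 0| < threshold then (st.1, st.2 ++ [c])
          else (st.1 ++ [pyRoundAvg st.2.sum (st.2.length : Int)], [c]))
        ([], [c0])
      st.1 ++ [pyRoundAvg st.2.sum (st.2.length : Int)]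

-- ===== PORT B =====
def nms_line_coords_alt (coords : List Int) (threshold : Int) : List Int :=
  let s := PySem.List.sorted coords (fun x => x) false
  if s = [] then []
  else
    let cuts : List Int :=
      [0] ++ (PySem.List.pyRange 1 (PySem.List.len s) 1).filter
        (fun i => decide (threshold ≤ PySem.List.pyGetD s i 0 - PySem.List.pyGetD s (i - 1) 0))
      ++ [PySem.List.len s]
    (cuts.zip (PySem.List.slice cuts (some 1) none)).map
      (fun p => pyRoundAvg (PySem.List.slice s (some p.1) (some p.2)).sum (p.2 - p.1))

-- ===== PRECONDITION & SPEC =====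
def Spec_nms_line_coords (coords : List Int) (threshold : Int) (out : List Int) : Prop := out = nms_line_coords_alt coords threshold
instance (coords : List Int) (threshold : Int) (out : List Int) : Decidable (Spec_nms_line_coords coords threshold out) := by unfold Spec_nms_line_coords; infer_instance

-- ===== CLAIM (what is proved, stated in full; the proofs are below) =====
def Claim_equal_nms_line_coords : Prop := ∀ (coords : List Int) (threshold : Int), Dom_nms_line_coords coords threshold → Spec_nms_line_coords coords threshold (nms_line_coords coords threshold)

-- ===== LEMMAS AND PROOFS =====

-- ghost: A's loop with an explicit open group g and remaining input l
def segsFrom (T : Int) (g : List Int) : List Int → List (List Int)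
  | [] => [g]
  | c :: l => if |c - g.getLast?.getD 0| < T then segsFrom T (g ++ [c]) l else g :: segsFrom T [c] l

def repHead (g : List Int) : List (List Int) → List (List Int)
  | [] => [g]
  | [] :: gs => g :: gs
  | (_ :: r) :: gs => (g ++ r) :: gs

def avgOf (g : List Int) : Int := pyRoundAvg g.sum (g.length : Int)

lemma pyGetD_cons_shift (c : Int) (t : List Int) (i : Int) (h : 0 ≤ i) :
    PySem.List.pyGetD (c :: t) (i + 1) 0 = PySem.List.pyGetD t i 0 := by
  unfold PySem.List.pyGetD
  rw [PySem.List.pyGet?_of_nonneg _ (by omega : (0:Int) ≤ i + 1), PySem.List.pyGet?_of_nonneg _ h]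
  have : (i + 1).toNat = i.toNat + 1 := by omega
  rw [this]
  simp

lemma pyRange_shift (a b : Int) :
    PySem.List.pyRange (a + 1) (b + 1) 1 = (PySem.List.pyRange a b 1).map (· + 1) := by
  rw [PySem.List.pyRange_one, PySem.List.pyRange_one]
  have : b + 1 - (a + 1) = b - a := by ring
  rw [this, List.map_map]
  exact List.map_congr_left (fun k _ => by simp [Function.comp]; ring)

def gapIdx (T : Int) (s : List Int) : List Int :=
  (PySem.List.pyRange 1 (PySem.List.len s) 1).filter
    (fun i => decide (T ≤ PySem.List.pyGetD s i 0 - PySem.List.pyGetD s (i - 1) 0))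

lemma gapIdx_cons (T c d : Int) (l : List Int) :
    gapIdx T (c :: d :: l)
      = (if T ≤ d - c then [1] else []) ++ (gapIdx T (d :: l)).map (· + 1) := by
  unfold gapIdx
  have hlen : PySem.List.len (c :: d :: l) = ((d :: l).length : Int) + 1 := by
    simp [PySem.List.len_eq]
  have hlen2 : PySem.List.len (d :: l) = ((d :: l).length : Int) := by
    simp [PySem.List.len_eq]
  rw [hlen, hlen2]
  have hn : (1 : Int) ≤ ((d :: l).length : Int) := by
    have : 1 ≤ (d :: l).length := by simp
    exact_mod_cast this
  rw [PySem.List.pyRange_one_cons (by omega)]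
  have hsplit : PySem.List.pyRange (1 + 1) (((d :: l).length : Int) + 1) 1
      = (PySem.List.pyRange 1 ((d :: l).length : Int) 1).map (· + 1) := pyRange_shift _ _
  rw [List.filter_cons, hsplit, List.filter_map]
  have hcongr : ∀ i ∈ PySem.List.pyRange 1 ((d :: l).length : Int) 1,
      ((fun i => decide (T ≤ PySem.List.pyGetD (c :: d :: l) i 0 - PySem.List.pyGetD (c :: d :: l) (i - 1) 0)) ∘ (· + 1)) i
      = (fun i => decide (T ≤ PySem.List.pyGetD (d :: l) i 0 - PySem.List.pyGetD (d :: l) (i - 1) 0)) i := by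
    intro i hi
    have hi1 := (PySem.List.mem_pyRange_one.mp hi).1
    simp only [Function.comp]
    have e1 : PySem.List.pyGetD (c :: d :: l) (i + 1) 0 = PySem.List.pyGetD (d :: l) i 0 :=
      pyGetD_cons_shift _ _ _ (by omega)
    have e2 : PySem.List.pyGetD (c :: d :: l) (i + 1 - 1) 0 = PySem.List.pyGetD (d :: l) (i - 1) 0 := by
      have : i + 1 - 1 = (i - 1) + 1 := by ring
      rw [this, pyGetD_cons_shift _ _ _ (by omega)]
    rw [e1, e2]
  rw [List.filter_congr hcongr]
  have hd1 : PySem.List.pyGetD (c :: d :: l) 1 0 = d := by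
    rw [PySem.List.pyGetD_ofNat']; rfl
  have hd0 : PySem.List.pyGetD (c :: d :: l) (1 - 1) 0 = c := by
    norm_num [PySem.List.pyGetD_zero_cons]
  rw [hd1, hd0]
  by_cases hb : T ≤ d - c <;> simp [hb]

def cutsOf (T : Int) (s : List Int) : List Int := 0 :: (gapIdx T s ++ [PySem.List.len s])

def segs (T : Int) : List Int → List (List Int)
  | [] => []
  | [c] => [[c]]
  | c :: d :: l =>
    match segs T (d :: l) with
    | [] => [[c]]
    | g :: gs => if T ≤ d - c then [c] :: g :: gs else (c :: g) :: gs

lemma segs_shape (T : Int) (c : Int) (l : List Int) :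
    ∃ r gs, segs T (c :: l) = (c :: r) :: gs := by
  cases l with
  | nil => exact ⟨[], [], rfl⟩
  | cons d l' =>
    cases h : segs T (d :: l') with
    | nil => exact ⟨[], [], by simp [segs, h]⟩
    | cons g gs =>
      by_cases hc : T ≤ d - c
      · exact ⟨[], g :: gs, by simp [segs, h, hc]⟩
      · exact ⟨g, gs, by simp [segs, h, hc]⟩

lemma mem_cuts_nonneg (T : Int) (s : List Int) : ∀ x ∈ cutsOf T s, 0 ≤ x := by
  intro x hx
  rcases List.mem_cons.mp hx with h | h
  · omega
  rcases List.mem_append.mp h with h | h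
  · have hm := List.mem_of_mem_filter h
    have := (PySem.List.mem_pyRange_one.mp hm).1
    omega
  · simp only [List.mem_singleton] at h
    subst h
    simp [PySem.List.len_eq]

lemma slice_cons_shift (c : Int) (t : List Int) (a b : Int) (ha : 0 ≤ a) (hb : 0 ≤ b) :
    PySem.List.slice (c :: t) (some (a + 1)) (some (b + 1)) = PySem.List.slice t (some a) (some b) := by
  rw [PySem.List.slice_toNat _ (by omega) (by omega), PySem.List.slice_toNat _ ha hb]
  have h1 : (a + 1).toNat = a.toNat + 1 := by omega
  have h2 : (b + 1).toNat = b.toNat + 1 := by omega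
  rw [h1, h2]
  simp

lemma slice_zero_succ (c : Int) (t : List Int) (b : Int) (hb : 0 ≤ b) :
    PySem.List.slice (c :: t) (some 0) (some (b + 1)) = c :: PySem.List.slice t (some 0) (some b) := by
  rw [PySem.List.slice_toNat _ (by omega) (by omega), PySem.List.slice_toNat _ (by omega) hb]
  have h2 : (b + 1).toNat = b.toNat + 1 := by omega
  simp [h2]

lemma map_shift_slice (c : Int) (t : List Int) (ps : List (Int × Int))
    (h : ∀ p ∈ ps, 0 ≤ p.1 ∧ 0 ≤ p.2) :
    (ps.map (Prod.map (· + 1) (· + 1))).map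
        (fun p => (PySem.List.slice (c :: t) (some p.1) (some p.2), p.2 - p.1))
      = ps.map (fun p => (PySem.List.slice t (some p.1) (some p.2), p.2 - p.1)) := by
  rw [List.map_map]
  refine List.map_congr_left ?_
  intro p hp
  obtain ⟨h1, h2⟩ := h p hp
  simp only [Function.comp, Prod.map]
  rw [slice_cons_shift _ _ _ _ h1 h2]
  simp

lemma pairs_eq_segs (T : Int) : ∀ (s : List Int), s ≠ [] →
    ((cutsOf T s).zip (cutsOf T s).tail).map
        (fun p => (PySem.List.slice s (some p.1) (some p.2), p.2 - p.1))
      = (segs T s).map (fun g => (g, (g.length : Int))) := by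
  intro s
  induction s with
  | nil => intro h; exact absurd rfl h
  | cons c l ih =>
    intro _
    cases l with
    | nil =>
      simp [cutsOf, gapIdx, segs, PySem.List.len_eq, PySem.List.pyRange_one_eq_nil,
        PySem.List.slice_toNat]
    | cons d l' =>
      have ihl := ih (by simp)
      obtain ⟨r, gs, hsh⟩ := segs_shape T d l'
      set u : List Int := gapIdx T (d :: l') ++ [PySem.List.len (d :: l')] with hu_def
      have hcuts_l : cutsOf T (d :: l') = 0 :: u := rfl
      have hlen_s : PySem.List.len (c :: d :: l') = PySem.List.len (d :: l') + 1 := by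
        simp [PySem.List.len_eq]
      have hcuts_s : cutsOf T (c :: d :: l')
          = 0 :: ((if T ≤ d - c then [1] else []) ++ u.map (· + 1)) := by
        unfold cutsOf
        rw [gapIdx_cons, hlen_s, hu_def]
        simp [List.map_append]
      have hnn : ∀ p ∈ ((0 : Int) :: u).zip u, 0 ≤ p.1 ∧ 0 ≤ p.2 := by
        intro p hp
        obtain ⟨hp1, hp2⟩ := List.of_mem_zip hp
        exact ⟨mem_cuts_nonneg T (d :: l') p.1 (by rw [hcuts_l]; exact hp1),
          mem_cuts_nonneg T (d :: l') p.2 (by rw [hcuts_l]; exact List.mem_cons_of_mem _ hp2)⟩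
      by_cases hb : T ≤ d - c
      · -- break: a new group [c]
        have hsegs : segs T (c :: d :: l') = [c] :: segs T (d :: l') := by
          rw [segs.eq_def]; simp [hsh, hb]
        rw [hcuts_s, if_pos hb, hsegs]
        simp only [List.singleton_append, List.tail_cons, List.zip_cons_cons, List.map_cons]
        have hzz : ((1 : Int) :: u.map (· + 1)).zip (u.map (· + 1))
            = (((0 : Int) :: u).zip u).map (Prod.map (· + 1) (· + 1)) := by
          rw [show ((1 : Int) :: u.map (· + 1)) = ((0 : Int) :: u).map (· + 1) from by simp,
            List.zip_map]
        rw [hzz, map_shift_slice c (d :: l') _ hnn]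
        rw [show ((0 : Int) :: u).zip u = (cutsOf T (d :: l')).zip (cutsOf T (d :: l')).tail from by
          rw [hcuts_l, List.tail_cons]]
        rw [ihl]
        have hfirst : PySem.List.slice (c :: d :: l') (some 0) (some 1) = [c] := by
          rw [PySem.List.slice_toNat _ (by omega) (by omega)]; rfl
        simp [hfirst]
      · -- no break: c joins the first group of the rest
        have hsegs : segs T (c :: d :: l') = (c :: d :: r) :: gs := by
          rw [segs.eq_def]; simp [hsh, hb]
        have hu_ne : u ≠ [] := by simp [hu_def]
        obtain ⟨u0, u', hu⟩ : ∃ u0 u', u = u0 :: u' := by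
          cases hx : u with
          | nil => exact absurd hx hu_ne
          | cons a b => exact ⟨a, b, rfl⟩
        rw [hcuts_s, if_neg hb, hsegs]
        rw [hu] at hnn ⊢
        rw [hcuts_l, hu] at ihl
        simp only [List.nil_append, List.map_cons, List.tail_cons, List.zip_cons_cons] at ihl ⊢
        rw [hsh] at ihl
        simp only [List.map_cons] at ihl
        have hhead := ((List.cons.injEq _ _ _ _).mp ihl).1
        have htail := ((List.cons.injEq _ _ _ _).mp ihl).2
        have hslice0 : PySem.List.slice (d :: l') (some 0) (some u0) = d :: r := by
          have := congrArg Prod.fst hhead; simpa using this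
        have hu0 : u0 = ((d :: r).length : Int) := by
          have := congrArg Prod.snd hhead; simpa using this
        have hu0nn : 0 ≤ u0 := by rw [hu0]; positivity
        have hzz : ((u0 + 1) :: u'.map (· + 1)).zip (u'.map (· + 1))
            = (((u0 : Int) :: u').zip u').map (Prod.map (· + 1) (· + 1)) := by
          rw [show ((u0 + 1) :: u'.map (· + 1)) = ((u0 : Int) :: u').map (· + 1) from by simp,
            List.zip_map]
        rw [hzz, map_shift_slice c (d :: l') ((u0 :: u').zip u') (fun p hp => hnn p (List.mem_cons_of_mem _ hp))]
        rw [htail]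
        have hfirst : PySem.List.slice (c :: d :: l') (some 0) (some (u0 + 1)) = c :: d :: r := by
          rw [slice_zero_succ _ _ _ hu0nn, hslice0]
        rw [hfirst]
        have : u0 + 1 - 0 = ((c :: d :: r).length : Int) := by
          rw [hu0]; simp only [List.length_cons]; push_cast; ring
        rw [this]

lemma foldA_eq_segsFrom (T : Int) (l : List Int) :
    ∀ (merged g : List Int),
      (l.foldl
        (fun (st : List Int × List Int) c =>
          if |c - st.2.getLast?.getD 0| < T then (st.1, st.2 ++ [c])
          else (st.1 ++ [pyRoundAvg st.2.sum (st.2.length : Int)], [c]))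
        (merged, g)).1
      ++ [pyRoundAvg (l.foldl
        (fun (st : List Int × List Int) c =>
          if |c - st.2.getLast?.getD 0| < T then (st.1, st.2 ++ [c])
          else (st.1 ++ [pyRoundAvg st.2.sum (st.2.length : Int)], [c]))
        (merged, g)).2.sum ((l.foldl
        (fun (st : List Int × List Int) c =>
          if |c - st.2.getLast?.getD 0| < T then (st.1, st.2 ++ [c])
          else (st.1 ++ [pyRoundAvg st.2.sum (st.2.length : Int)], [c]))
        (merged, g)).2.length : Int)]
      = merged ++ (segsFrom T g l).map avgOf := by
  induction l with
  | nil => intro merged g; simp [segsFrom, avgOf]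
  | cons c l ih =>
    intro merged g
    by_cases hc : |c - g.getLast?.getD 0| < T
    · simp only [List.foldl_cons, segsFrom]
      rw [if_pos hc, if_pos hc]
      simpa using ih merged (g ++ [c])
    · simp only [List.foldl_cons, segsFrom]
      rw [if_neg hc, if_neg hc, ih (merged ++ [pyRoundAvg g.sum (g.length : Int)]) [c]]
      simp [avgOf]

lemma segsFrom_eq_repHead (T : Int) (l : List Int) :
    ∀ (g : List Int) (x : Int), g ≠ [] → g.getLast?.getD 0 = x →
      List.IsChain (· ≤ ·) (x :: l) →
      segsFrom T g l = repHead g (segs T (x :: l)) := by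
  induction l with
  | nil =>
    intro g x _ _ _
    simp [segsFrom, segs, repHead]
  | cons c l ih =>
    intro g x hg hx hch
    obtain ⟨r, gs, hshape⟩ := segs_shape T c l
    have hxc : x ≤ c := (List.isChain_cons_cons.mp hch).1
    have hch' : List.IsChain (· ≤ ·) (c :: l) := (List.isChain_cons_cons.mp hch).2
    have hB : segs T (x :: c :: l)
        = if T ≤ c - x then [x] :: (c :: r) :: gs else (x :: c :: r) :: gs := by
      rw [segs.eq_def]
      simp [hshape]
    by_cases hc : |c - x| < T
    · have habs : ¬ T ≤ c - x := by
        rw [abs_of_nonneg (by omega)] at hc; omega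
      simp only [segsFrom, hx]
      rw [if_pos hc, ih (g ++ [c]) c (by simp) (by simp) hch', hshape, hB, if_neg habs]
      simp [repHead]
    · have habs : T ≤ c - x := by
        rw [abs_of_nonneg (by omega)] at hc; omega
      simp only [segsFrom, hx]
      rw [if_neg hc, ih [c] c (by simp) (by simp) hch', hshape, hB, if_pos habs]
      simp [repHead]

lemma sorted_ne_nil (coords : List Int) (h : coords ≠ []) :
    PySem.List.sorted coords (fun x => x) false ≠ [] := by
  intro hnil
  exact h ((PySem.List.sorted_eq_nil_iff coords (fun x => x) false).mp hnil)

-- ===== VERDICT (by name: the statement is the Claim_ definition above) =====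
theorem nms_line_coords_spec : Claim_equal_nms_line_coords := by
  intro coords T _
  unfold Spec_nms_line_coords nms_line_coords nms_line_coords_alt
  by_cases hco : coords = []
  · subst hco
    simp [PySem.List.sorted]
  · rw [if_neg hco]
    cases hs : PySem.List.sorted coords (fun x => x) false with
    | nil => exact absurd hs (sorted_ne_nil coords hco)
    | cons c0 rest =>
      have hch : List.IsChain (· ≤ ·) (c0 :: rest) := by
        have hp := PySem.List.sorted_pairwise (xs := coords) (key := fun x : Int => x)
        rw [hs] at hp
        exact List.Pairwise.isChain hp
      rw [if_neg (by simp : (c0 :: rest : List Int) ≠ [])]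
      dsimp only
      -- A side
      rw [foldA_eq_segsFrom T rest [] [c0], List.nil_append,
        segsFrom_eq_repHead T rest [c0] c0 (by simp) (by simp) hch]
      obtain ⟨r, gs, hshape⟩ := segs_shape T c0 rest
      rw [hshape]
      show ((([c0] ++ r) :: gs).map avgOf) = _
      -- B side
      have hcuts : ([(0 : Int)] ++ (PySem.List.pyRange 1 (PySem.List.len (c0 :: rest)) 1).filter
            (fun i => decide (T ≤ PySem.List.pyGetD (c0 :: rest) i 0 - PySem.List.pyGetD (c0 :: rest) (i - 1) 0))
          ++ [PySem.List.len (c0 :: rest)]) = cutsOf T (c0 :: rest) := by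
        simp [cutsOf, gapIdx]
      rw [hcuts, PySem.List.slice_from_one]
      have hcomp : (fun p : Int × Int =>
            pyRoundAvg (PySem.List.slice (c0 :: rest) (some p.1) (some p.2)).sum (p.2 - p.1))
          = (fun q : List Int × Int => pyRoundAvg q.1.sum q.2)
            ∘ (fun p : Int × Int => (PySem.List.slice (c0 :: rest) (some p.1) (some p.2), p.2 - p.1)) := rfl
      rw [hcomp, ← List.map_map, pairs_eq_segs T (c0 :: rest) (by simp), List.map_map, hshape]
      rfl
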